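-- pv_equiv track=rewrite | github.com/shachafk/FP_Growth | fpGrowth.py | orderTable
-- ===== SOURCE A (Python) =====
-- def orderTable(headerTable):
--     # order header table by count and alpabet
--     items = headerTable.items()
--     keys = headerTable.keys()
--     values = headerTable.values()
--     orderedHeader = dict(sorted(headerTable.items(), key=lambda k: (k[0])))
--     i = len(orderedHeader)
--     for k in orderedHeader:
--         orderedHeader[k] = orderedHeader[k], i
--         i = i - 1
--     orderedHeader = dict(sorted(orderedHeader.items(), key=lambda k: (k[1]), reverse=True))
--     newHeader = {}
--     for k in orderedHeader:
--         newHeader[k] = orderedHeader[k][0]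
--
--     return newHeader
-- ===== SOURCE B (Python) =====
-- def orderTable(headerTable):
--     # one composite-key sort: count descending, key ascending
--     return dict(sorted(headerTable.items(), key=lambda kv: (-kv[1], kv[0])))
-- ===== Notes on version B (the rewrite author's own statement) =====
-- stated objective: simpler
-- what changed: A's three passes (alphabetical sort, attaching descending rank numbers, a second reverse sort by (count, rank), then rebuilding the dict) are replaced by one sort with the composite key (-count, key).
import Mathlib
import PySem

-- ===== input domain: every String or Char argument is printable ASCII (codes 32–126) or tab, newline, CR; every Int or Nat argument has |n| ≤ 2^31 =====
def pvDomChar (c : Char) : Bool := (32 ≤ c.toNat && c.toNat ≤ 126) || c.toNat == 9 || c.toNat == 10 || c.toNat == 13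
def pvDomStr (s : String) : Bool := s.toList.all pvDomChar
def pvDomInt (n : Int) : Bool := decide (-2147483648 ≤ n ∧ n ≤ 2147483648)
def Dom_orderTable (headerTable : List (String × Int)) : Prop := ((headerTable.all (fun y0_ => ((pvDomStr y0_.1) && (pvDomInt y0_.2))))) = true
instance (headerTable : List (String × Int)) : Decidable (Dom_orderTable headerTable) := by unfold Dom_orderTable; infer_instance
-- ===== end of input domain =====

-- B replaces A's three passes by one composite-key sort; equality of the returned dict is proved on inputs with distinct keys.

-- ===== PORT A =====
-- the rank-attaching for-loop of A: i starts at the length and is decremented after each key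
def orderTableRank (l : List (String × Int)) (i : Int) : List (String × (Int × Int)) :=
  match l with
  | [] => []
  | kv :: t => (kv.1, (kv.2, i)) :: orderTableRank t (i - 1)

def orderTable (headerTable : List (String × Int)) : List (String × Int) :=
  -- orderedHeader = dict(sorted(headerTable.items(), key=lambda k: k[0]))  (keys distinct: dict build keeps the sorted list)
  let orderedHeader := PySem.List.sorted headerTable (fun kv => kv.1) false
  -- i = len(orderedHeader); for k in orderedHeader: orderedHeader[k] = orderedHeader[k], i; i = i - 1
  let ranked := orderTableRank orderedHeader (orderedHeader.length : Int)
  -- orderedHeader = dict(sorted(orderedHeader.items(), key=lambda k: k[1], reverse=True)) — tuple value (count, rank)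
  let ordered2 := PySem.List.sorted2 ranked (fun kv => kv.2.1) (fun kv => kv.2.2) true
  -- newHeader = {}; for k in orderedHeader: newHeader[k] = orderedHeader[k][0]  (distinct keys: each insert appends)
  ordered2.map (fun kv => (kv.1, kv.2.1))

-- ===== PORT B =====
def orderTable_alt (headerTable : List (String × Int)) : List (String × Int) :=
  -- dict(sorted(headerTable.items(), key=lambda kv: (-kv[1], kv[0])))  (keys distinct: dict build keeps the sorted list)
  PySem.List.sorted2 headerTable (fun kv => -kv.2) (fun kv => kv.1) false

-- ===== PRECONDITION & SPEC =====
-- Pre_ excludes association lists with duplicate keys: they do not represent any Python dict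
-- (A's parameter is a dict, whose keys are unique), so no behaviour of A is specified for them.
def Pre_orderTable (headerTable : List (String × Int)) : Prop :=
  (headerTable.map Prod.fst).Nodup

instance (headerTable : List (String × Int)) : Decidable (Pre_orderTable headerTable) := by
  unfold Pre_orderTable; infer_instance

def pvWitness_orderTable : (List (String × Int)) := [("b", 1), ("a", 1), ("c", 2)]

def Spec_orderTable (headerTable : List (String × Int)) (out : List (String × Int)) : Prop := out = orderTable_alt headerTable
instance (headerTable : List (String × Int)) (out : List (String × Int)) : Decidable (Spec_orderTable headerTable out) := by unfold Spec_orderTable; infer_instance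

-- ===== CLAIM (what is proved, stated in full; the proofs are below) =====
def Claim_equal_orderTable : Prop := ∀ (headerTable : List (String × Int)), Dom_orderTable headerTable → Pre_orderTable headerTable → Spec_orderTable headerTable (orderTable headerTable)

-- ===== LEMMAS AND PROOFS =====

-- the target order: count descending, key ascending (strict; total on pairs with distinct keys)
def OTlt (a b : String × Int) : Prop := b.2 < a.2 ∨ (a.2 = b.2 ∧ a.1 < b.1)

theorem OTlt_antisymm : ∀ (a b : String × Int), OTlt a b → OTlt b a → a = b := by
  intro a b hab hba
  rcases hab with h1 | ⟨h1, h2⟩ <;> rcases hba with h3 | ⟨h3, h4⟩ <;>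
    first
      | omega
      | exact absurd h4 (lt_asymm h2)

-- insertion into a list sorted by `before` preserves the "no later element is before an earlier one" invariant
theorem pairwise_insertBy {α : Type} (before : α → α → Bool)
    (hasym : ∀ a b, before a b = true → before b a = false)
    (htrans : ∀ a b c, before a b = true → before b c = true → before a c = true)
    (x : α) (ys : List α) (h : ys.Pairwise (fun a b => before b a = false)) :
    (PySem.List.insertBy before x ys).Pairwise (fun a b => before b a = false) := by
  induction ys with
  | nil => simp [PySem.List.insertBy]
  | cons y ys ih =>
    rw [List.pairwise_cons] at h
    obtain ⟨hy, hys⟩ := h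
    by_cases hxy : before x y = true
    · rw [PySem.List.insertBy, if_pos hxy]
      refine List.pairwise_cons.2 ⟨?_, List.pairwise_cons.2 ⟨hy, hys⟩⟩
      intro z hz
      rcases List.mem_cons.1 hz with rfl | hz
      · exact hasym _ _ hxy
      · by_contra hzx
        have hzx' : before z x = true := by
          cases hzy : before z x <;> simp_all
        exact absurd (hy z hz) (by simp [htrans _ _ _ hzx' hxy])
    · rw [PySem.List.insertBy, if_neg hxy]
      refine List.pairwise_cons.2 ⟨?_, ih hys⟩
      intro z hz
      rcases (PySem.List.mem_insertBy before x z ys).1 hz with rfl | hz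
      · simpa using hxy
      · exact hy z hz

theorem pairwise_foldl_insertBy {α : Type} (before : α → α → Bool)
    (hasym : ∀ a b, before a b = true → before b a = false)
    (htrans : ∀ a b c, before a b = true → before b c = true → before a c = true) :
    ∀ (xs acc : List α), acc.Pairwise (fun a b => before b a = false) →
      (xs.foldl (fun acc x => PySem.List.insertBy before x acc) acc).Pairwise
        (fun a b => before b a = false) := by
  intro xs
  induction xs with
  | nil => intro acc h; exact h
  | cons x xs ih =>
    intro acc h
    exact ih _ (pairwise_insertBy before hasym htrans x acc h)

theorem rank_map_proj (l : List (String × Int)) (i : Int) :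
    (orderTableRank l i).map (fun kv => (kv.1, kv.2.1)) = l := by
  induction l generalizing i with
  | nil => rfl
  | cons kv t ih => simp [orderTableRank, ih]

theorem rank_mem (l : List (String × Int)) (i : Int) :
    ∀ z ∈ orderTableRank l i, (z.1, z.2.1) ∈ l ∧ z.2.2 ≤ i := by
  induction l generalizing i with
  | nil => intro z hz; simp [orderTableRank] at hz
  | cons kv t ih =>
    intro z hz
    rcases List.mem_cons.1 hz with rfl | hz
    · exact ⟨List.mem_cons_self, le_rfl⟩
    · obtain ⟨hm, hr⟩ := ih (i - 1) z hz
      exact ⟨List.mem_cons_of_mem _ hm, by omega⟩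

theorem rank_pairwise (l : List (String × Int)) (i : Int)
    (h : l.Pairwise (fun a b => a.1 < b.1)) :
    (orderTableRank l i).Pairwise (fun a b => b.2.2 < a.2.2 ∧ a.1 < b.1) := by
  induction l generalizing i with
  | nil => exact List.Pairwise.nil
  | cons kv t ih =>
    rw [List.pairwise_cons] at h
    refine List.pairwise_cons.2 ⟨?_, ih (i - 1) h.2⟩
    intro z hz
    obtain ⟨hm, hr⟩ := rank_mem t (i - 1) z hz
    exact ⟨by dsimp only; omega, h.1 _ hm⟩

theorem OTlt_irrefl (a : String × Int) : ¬ OTlt a a := by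
  rintro (h | ⟨h1, h2⟩)
  · omega
  · exact lt_irrefl _ h2

theorem OTlt_trans : ∀ (a b c : String × Int), OTlt a b → OTlt b c → OTlt a c := by
  rintro a b c (h1 | ⟨h1, h2⟩) (h3 | ⟨h3, h4⟩)
  · exact Or.inl (by omega)
  · exact Or.inl (by omega)
  · exact Or.inl (by omega)
  · exact Or.inr ⟨by omega, lt_trans h2 h4⟩

theorem OTlt_total (a b : String × Int) (h : a.1 ≠ b.1) : OTlt a b ∨ OTlt b a := by
  rcases lt_trichotomy a.2 b.2 with h2 | h2 | h2
  · exact Or.inr (Or.inl h2)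
  · rcases lt_or_gt_of_ne h with h1 | h1
    · exact Or.inl (Or.inr ⟨h2, h1⟩)
    · exact Or.inr (Or.inr ⟨h2.symm, h1⟩)
  · exact Or.inl (Or.inl h2)

-- the comparison B sorts with
def beforeB (a b : String × Int) : Bool :=
  decide (-a.2 < -b.2) || (!decide (-b.2 < -a.2) && decide (a.1 < b.1))

theorem beforeB_iff (a b : String × Int) : beforeB a b = true ↔ OTlt a b := by
  simp only [beforeB, Bool.or_eq_true, Bool.and_eq_true, Bool.not_eq_true',
    decide_eq_true_eq, decide_eq_false_iff_not, neg_lt_neg_iff, OTlt]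
  constructor
  · rintro (h | ⟨h1, h2⟩)
    · exact Or.inl h
    · rcases lt_or_eq_of_le (le_of_not_gt (by simpa using h1)) with h3 | h3
      · exact Or.inl h3
      · exact Or.inr ⟨h3.symm, h2⟩
  · rintro (h | ⟨h1, h2⟩)
    · exact Or.inl h
    · exact Or.inr ⟨by omega, h2⟩

theorem beforeB_asym : ∀ a b, beforeB a b = true → beforeB b a = false := by
  intro a b hab
  rw [Bool.eq_false_iff]
  intro hba
  have h := OTlt_antisymm a b ((beforeB_iff a b).1 hab) ((beforeB_iff b a).1 hba)
  exact OTlt_irrefl a (h ▸ (beforeB_iff a b).1 hab)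

theorem beforeB_trans : ∀ a b c, beforeB a b = true → beforeB b c = true → beforeB a c = true := by
  intro a b c hab hbc
  exact (beforeB_iff a c).2 (OTlt_trans a b c ((beforeB_iff a b).1 hab) ((beforeB_iff b c).1 hbc))

-- the comparison A's second (reverse) sort uses on (key, (count, rank)) triples
def beforeA (a b : String × (Int × Int)) : Bool :=
  decide (b.2.1 < a.2.1) || (!decide (a.2.1 < b.2.1) && decide (b.2.2 < a.2.2))

theorem beforeA_false_iff (a b : String × (Int × Int)) :
    beforeA a b = false ↔ ¬ b.2.1 < a.2.1 ∧ (a.2.1 < b.2.1 ∨ ¬ b.2.2 < a.2.2) := by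
  unfold beforeA
  by_cases h1 : b.2.1 < a.2.1 <;> by_cases h2 : a.2.1 < b.2.1 <;>
    by_cases h3 : b.2.2 < a.2.2 <;> simp [h1, h2, h3]

theorem beforeA_asym : ∀ a b, beforeA a b = true → beforeA b a = false := by
  intro a b hab
  rw [Bool.eq_false_iff]
  intro hba
  simp only [beforeA, Bool.or_eq_true, Bool.and_eq_true, Bool.not_eq_true',
    decide_eq_true_eq, decide_eq_false_iff_not] at hab hba
  omega

theorem beforeA_trans : ∀ a b c, beforeA a b = true → beforeA b c = true → beforeA a c = true := by
  intro a b c hab hbc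
  simp only [beforeA, Bool.or_eq_true, Bool.and_eq_true, Bool.not_eq_true',
    decide_eq_true_eq, decide_eq_false_iff_not] at hab hbc ⊢
  omega

theorem orderTable_spec' (h : List (String × Int)) (hpre : Pre_orderTable h) :
    orderTable h = orderTable_alt h := by
  classical
  -- names for A's intermediate lists
  set S := PySem.List.sorted h (fun kv => kv.1) false with hS
  set ranked := orderTableRank S (S.length : Int) with hranked_def
  set T := PySem.List.sorted2 ranked (fun kv => kv.2.1) (fun kv => kv.2.2) true with hT
  have hAeq : orderTable h = T.map (fun kv => (kv.1, kv.2.1)) := rfl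
  have hSperm : S.Perm h := PySem.List.sorted_perm h (fun kv => kv.1) false
  have hSfst : (S.map Prod.fst).Nodup := ((hSperm.map Prod.fst).nodup_iff).2 hpre
  have hSlt : S.Pairwise (fun a b => a.1 < b.1) := by
    have h1 := PySem.List.sorted_pairwise h (fun kv => kv.1)
    have h2 : S.Pairwise (fun a b => a.1 ≠ b.1) := List.pairwise_map.mp hSfst
    exact (h1.and h2).imp (fun hp => lt_of_le_of_ne hp.1 hp.2)
  have hQ := rank_pairwise S (S.length : Int) hSlt
  have hRnodup : ranked.Nodup := hQ.imp (fun hp heq => by rw [heq] at hp; omega)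
  have hsym : Symmetric (fun (a b : String × Int × Int) =>
      (b.2.2 < a.2.2 ∧ a.1 < b.1) ∨ (a.2.2 < b.2.2 ∧ b.1 < a.1)) := by
    intro a b hp
    exact hp.symm
  have hDich : ∀ a ∈ ranked, ∀ b ∈ ranked, a ≠ b →
      (b.2.2 < a.2.2 ∧ a.1 < b.1) ∨ (a.2.2 < b.2.2 ∧ b.1 < a.1) :=
    fun a ha b hb hne =>
      List.Pairwise.forall hsym (hQ.imp (fun hp => Or.inl hp)) ha hb hne
  -- the reverse tuple-key sort of A, as a foldl of insertions
  have hTfold : T = ranked.foldl (fun acc x => PySem.List.insertBy beforeA x acc) [] := rfl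
  have hTperm : T.Perm ranked := PySem.List.sorted2_perm ranked _ _ true
  have hTpw : T.Pairwise (fun a b => beforeA b a = false) := by
    rw [hTfold]
    exact pairwise_foldl_insertBy beforeA beforeA_asym beforeA_trans ranked [] List.Pairwise.nil
  have hTnodup : T.Nodup := (hTperm.nodup_iff).2 hRnodup
  have hTstrict : T.Pairwise (fun a b => OTlt (a.1, a.2.1) (b.1, b.2.1)) := by
    refine ((hTpw.and hTnodup).imp_of_mem ?_)
    intro a b ha hb hp
    obtain ⟨hw, hne⟩ := hp
    rw [beforeA_false_iff] at hw
    obtain ⟨hw1, hw2⟩ := hw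
    have ha' : a ∈ ranked := hTperm.subset ha
    have hb' : b ∈ ranked := hTperm.subset hb
    rcases hDich a ha' b hb' hne with ⟨hr, hk⟩ | ⟨hr, hk⟩
    · by_cases hv : a.2.1 = b.2.1
      · exact Or.inr ⟨hv, hk⟩
      · exact Or.inl (by omega)
    · exact Or.inl (by omega)
  have hApw : (orderTable h).Pairwise OTlt := by
    rw [hAeq]
    exact List.Pairwise.map _ (fun a b hp => hp) hTstrict
  have hAperm : (orderTable h).Perm h := by
    rw [hAeq]
    have h1 : (T.map (fun kv => (kv.1, kv.2.1))).Perm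
        (ranked.map (fun kv => (kv.1, kv.2.1))) := hTperm.map _
    rw [hranked_def, rank_map_proj] at h1
    exact h1.trans hSperm
  -- the B side
  have hBfold : orderTable_alt h = h.foldl (fun acc x => PySem.List.insertBy beforeB x acc) [] := rfl
  have hBperm : (orderTable_alt h).Perm h := PySem.List.sorted2_perm h _ _ false
  have hBweak : (orderTable_alt h).Pairwise (fun a b => beforeB b a = false) := by
    rw [hBfold]
    exact pairwise_foldl_insertBy beforeB beforeB_asym beforeB_trans h [] List.Pairwise.nil
  have hBfst : ((orderTable_alt h).map Prod.fst).Nodup := ((hBperm.map Prod.fst).nodup_iff).2 hpre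
  have hBne : (orderTable_alt h).Pairwise (fun a b => a.1 ≠ b.1) := List.pairwise_map.mp hBfst
  have hBpw : (orderTable_alt h).Pairwise OTlt := by
    refine (hBweak.and hBne).imp ?_
    rintro a b ⟨hw, hne⟩
    rcases OTlt_total a b hne with hlt | hlt
    · exact hlt
    · exact absurd ((beforeB_iff b a).2 hlt) (by simp [hw])
  -- two strictly ordered permutations of the same list are equal
  exact List.Perm.eq_of_pairwise (fun a b _ _ hab hba => OTlt_antisymm a b hab hba)
    hApw hBpw (hAperm.trans hBperm.symm)

-- ===== VERDICT (by name: the statement is the Claim_ definition above) =====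
theorem orderTable_spec : Claim_equal_orderTable := by
  intro h _ hpre
  exact orderTable_spec' h hpre
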